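-- pv_equiv track=rewrite | github.com/mikedotexe/reptends | reptend_analysis.py | long_division_remainders
-- ===== SOURCE A (Python) =====
-- from math import gcd
-- from typing import Optional
--
-- def multiplicative_order(a: int, p: int) -> Optional[int]:
--     """
--     Compute ord_p(a) - the multiplicative order of a modulo p.
--
--     Returns the smallest positive integer m such that a^m ≡ 1 (mod p),
--     or None if gcd(a, p) ≠ 1.
--
--     By Lagrange's theorem, ord_p(a) divides φ(p) = p-1 for prime p.
--     """
--     if gcd(a, p) != 1:
--         return None
--
--     order = 1
--     val = a % p
--     while val != 1:
--         val = (val * a) % p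
--         order += 1
--         if order > p:
--             return None  # Shouldn't happen for coprime a, p
--     return order
--
-- def long_division_remainders(p: int, base: int = 10, steps: Optional[int] = None) -> list[int]:
--     """
--     Get the remainder sequence from long division of 1/p in given base.
--
--     The remainders satisfy:
--         r_0 = 1
--         r_{n+1} = (base * r_n) mod p
--
--     So r_n ≡ base^n (mod p).
--
--     If steps is None, computes until the sequence repeats (ord_p(base) steps).
--     """
--     if steps is None:
--         steps = multiplicative_order(base, p) or p
--
--     remainders = [1]
--     r = 1
--     for _ in range(steps - 1):
--         r = (r * base) % p
--         remainders.append(r)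
--     return remainders
-- ===== SOURCE B (Python) =====
-- from math import gcd
-- from typing import Optional
--
--
-- def _order_or_p(base: int, p: int) -> int:
--     """Multiplicative order of base mod p when p > 1 and gcd(base, p) == 1; otherwise p."""
--     if p <= 1 or gcd(base, p) != 1:
--         return p
--     m, v = 1, base % p
--     while v != 1:
--         v = v * base % p
--         m += 1
--     return m
--
--
-- def long_division_remainders(p: int, base: int = 10, steps: Optional[int] = None) -> list[int]:
--     """Remainder sequence of 1/p long division: r_n = base**n mod p, via closed-form pow."""
--     if steps is None:
--         steps = _order_or_p(base, p)
--     return [1] + [pow(base, n, p) for n in range(1, steps)]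
-- ===== Notes on version B (the rewrite author's own statement) =====
-- stated objective: alternative
-- what changed: B builds the remainder list from the closed form r_n = pow(base, n, p) over range(1, steps) instead of A's sequential recurrence r = (r*base) % p with repeated append, and computes the step count with a single merged order helper (direct while loop returning p for p <= 1 or non-coprime base) instead of A's Optional-returning multiplicative_order with an 'or p' fallback and an order > p cap.
-- crash fix: For p = 0 with steps None and |base| = 1, A raises ZeroDivisionError (base % 0 inside multiplicative_order) while B returns [1]. — e.g. on long_division_remainders(0, 1, none): A raises ZeroDivisionError, B returns [1]
import Mathlib
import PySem

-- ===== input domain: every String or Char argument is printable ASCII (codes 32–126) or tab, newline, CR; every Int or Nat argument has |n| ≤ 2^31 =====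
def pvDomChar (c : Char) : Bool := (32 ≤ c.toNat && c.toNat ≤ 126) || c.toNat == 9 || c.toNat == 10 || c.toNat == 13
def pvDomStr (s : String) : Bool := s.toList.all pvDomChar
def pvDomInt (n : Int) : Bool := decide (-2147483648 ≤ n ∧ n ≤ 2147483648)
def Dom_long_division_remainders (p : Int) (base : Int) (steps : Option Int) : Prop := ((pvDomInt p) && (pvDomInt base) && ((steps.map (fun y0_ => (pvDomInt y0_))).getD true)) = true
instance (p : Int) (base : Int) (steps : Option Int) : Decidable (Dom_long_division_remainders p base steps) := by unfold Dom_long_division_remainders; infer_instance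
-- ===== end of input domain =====

-- B replaces A's sequential remainder recurrence by the closed form r_n = base^n mod p
-- (independent modular powers) and merges the order computation into one direct helper
-- (objective: alternative, same asymptotic cost).

-- ===== PORT A =====
-- while-loop of multiplicative_order; fuel = p.toNat + 1 is enough because the loop
-- returns None as soon as order exceeds p (at most p iterations).
def pvMoLoop (a p : Int) (fuel : Nat) (val order : Int) : Option Int :=
  if val = 1 then some order
  else
    match fuel with
    | 0 => none
    | f + 1 =>
      if order + 1 > p then none
      else pvMoLoop a p f (PySem.Int.mod (val * a) p) (order + 1)

def multiplicative_order (a p : Int) : Option Int :=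
  if Int.gcd a p ≠ 1 then none
  else pvMoLoop a p (p.toNat + 1) (PySem.Int.mod a p) 1

def long_division_remainders (p : Int) (base : Int) (steps : Option Int) : List Int :=
  let s : Int :=
    match steps with
    | some s => s
    | none =>
      -- `multiplicative_order(base, p) or p` (an int is falsy exactly when it is 0)
      match multiplicative_order base p with
      | some o => if o = 0 then p else o
      | none => p
  ((PySem.List.pyRange 0 (s - 1) 1).foldl
    (fun (st : List Int × Int) _ =>
      (st.1 ++ [PySem.Int.mod (st.2 * base) p], PySem.Int.mod (st.2 * base) p)) ([1], 1)).1

-- ===== PORT B =====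
-- while-loop of _order_or_p; reached only for coprime base and p ≥ 2, where the order
-- exists and is < p, so fuel p.toNat + 1 is never exhausted (the 0-case is a fuel guard).
def pvOrderLoop (base p : Int) (fuel : Nat) (v m : Int) : Int :=
  if v = 1 then m
  else
    match fuel with
    | 0 => m
    | f + 1 => pvOrderLoop base p f (PySem.Int.mod (v * base) p) (m + 1)

def pvOrderOrP (base p : Int) : Int :=
  if p ≤ 1 ∨ Int.gcd base p ≠ 1 then p
  else pvOrderLoop base p (p.toNat + 1) (PySem.Int.mod base p) 1

def long_division_remainders_alt (p : Int) (base : Int) (steps : Option Int) : List Int :=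
  let s : Int := steps.getD (pvOrderOrP base p)
  1 :: (PySem.List.pyRange 1 s 1).map (fun n => PySem.Int.powMod base n.toNat p)

-- ===== PRECONDITION & SPEC =====
-- Pre_ excludes exactly the inputs where A raises ZeroDivisionError (a modulus of 0):
-- p = 0 with steps None and |base| = 1, and p = 0 with a given steps ≥ 2.
def Pre_long_division_remainders (p : Int) (base : Int) (steps : Option Int) : Prop :=
  p ≠ 0 ∨ (steps = none ∧ base.natAbs ≠ 1) ∨ (steps ≠ none ∧ steps.getD 0 ≤ 1)
instance (p : Int) (base : Int) (steps : Option Int) : Decidable (Pre_long_division_remainders p base steps) := by unfold Pre_long_division_remainders; infer_instance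
def pvWitness_long_division_remainders : Int × Int × Option Int := (7, 10, none)

-- For p = 0 with steps None and |base| = 1, A raises ZeroDivisionError (base % 0 inside
-- multiplicative_order) while B returns [1].
def Raises_long_division_remainders (p : Int) (base : Int) (steps : Option Int) : Prop :=
  p = 0 ∧ base.natAbs = 1 ∧ steps = none
instance (p : Int) (base : Int) (steps : Option Int) : Decidable (Raises_long_division_remainders p base steps) := by unfold Raises_long_division_remainders; infer_instance
def pvRaiseWitness_long_division_remainders : Int × Int × Option Int := (0, 1, none)
def pvRaiseWitnessOut_long_division_remainders : List Int := [1]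

def Spec_long_division_remainders (p : Int) (base : Int) (steps : Option Int) (out : List Int) : Prop := out = long_division_remainders_alt p base steps
instance (p : Int) (base : Int) (steps : Option Int) (out : List Int) : Decidable (Spec_long_division_remainders p base steps out) := by unfold Spec_long_division_remainders; infer_instance

-- ===== CLAIM (what is proved, stated in full; the proofs are below) =====
def Claim_equal_long_division_remainders : Prop := ∀ (p : Int) (base : Int) (steps : Option Int), Dom_long_division_remainders p base steps → Pre_long_division_remainders p base steps → Spec_long_division_remainders p base steps (long_division_remainders p base steps)

def Claim_raises_long_division_remainders : Prop := (∀ (p : Int) (base : Int) (steps : Option Int), Dom_long_division_remainders p base steps → Raises_long_division_remainders p base steps → ¬ Pre_long_division_remainders p base steps) ∧ (Dom_long_division_remainders (pvRaiseWitness_long_division_remainders.1) (pvRaiseWitness_long_division_remainders.2.1) (pvRaiseWitness_long_division_remainders.2.2) ∧ Raises_long_division_remainders (pvRaiseWitness_long_division_remainders.1) (pvRaiseWitness_long_division_remainders.2.1) (pvRaiseWitness_long_division_remainders.2.2) ∧ long_division_remainders_alt (pvRaiseWitness_long_division_remainders.1) (pvRaiseWitness_long_division_remainders.2.1) (pvRaiseWitness_long_division_remainders.2.2)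 = pvRaiseWitnessOut_long_division_remainders)

-- ===== LEMMAS AND PROOFS =====

-- Python's `%` respects congruence mod p (covers p = 0, where x % 0 would raise in
-- Python but PySem.Int.mod x 0 = x makes the identity trivial).
lemma pv_mod_mul_mod (a b p : Int) :
    PySem.Int.mod (PySem.Int.mod a p * b) p = PySem.Int.mod (a * b) p := by
  obtain ⟨q, hq⟩ := Int.dvd_self_sub_fmod (x := a) (m := p)
  have h : PySem.Int.mod a p * b = a * b + p * (-(q * b)) := by
    have : PySem.Int.mod a p = a - p * q := by
      simp only [PySem.Int.mod]; linarith
    rw [this]; ring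
  simp only [PySem.Int.mod] at *
  rw [h, Int.add_mul_fmod_self_left]

-- A's remainder loop, characterised: starting from (acc, r), after |l| appends the list
-- is acc followed by r·base^(i+1) mod p.
lemma pv_foldA (p base : Int) (l : List Int) : ∀ (acc : List Int) (r : Int),
    (l.foldl (fun (st : List Int × Int) _ =>
        (st.1 ++ [PySem.Int.mod (st.2 * base) p], PySem.Int.mod (st.2 * base) p)) (acc, r)).1
    = acc ++ (List.range l.length).map (fun i => PySem.Int.mod (r * base ^ (i + 1)) p) := by
  induction l with
  | nil => intro acc r; simp
  | cons x t ih =>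
    intro acc r
    simp only [List.foldl_cons]
    rw [ih]
    have hf : ∀ i : Nat, PySem.Int.mod (PySem.Int.mod (r * base) p * base ^ (i + 1)) p
        = PySem.Int.mod (r * base ^ (i + 1 + 1)) p := by
      intro i; rw [pv_mod_mul_mod]; congr 1; ring
    rw [List.length_cons, List.range_succ_eq_map]
    simp only [List.map_cons, List.map_map, Function.comp_def, hf]
    simp [List.append_assoc]

-- Given equal step counts, the two list constructions agree (for every p, base, s).
lemma pv_lists_eq (p base s : Int) :
    ((PySem.List.pyRange 0 (s - 1) 1).foldl
      (fun (st : List Int × Int) _ =>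
        (st.1 ++ [PySem.Int.mod (st.2 * base) p], PySem.Int.mod (st.2 * base) p)) ([1], 1)).1
    = 1 :: (PySem.List.pyRange 1 s 1).map (fun n => PySem.Int.powMod base n.toNat p) := by
  rw [pv_foldA]
  rw [PySem.List.length_pyRange_one, PySem.List.pyRange_one 1 s]
  simp only [List.map_map, Function.comp_def]
  have h1 : (s - 1 - 0) = s - 1 := by ring
  rw [h1]
  rw [List.singleton_append]
  congr 1
  apply List.map_congr_left
  intro i _
  simp only [PySem.Int.powMod, one_mul]
  congr 2
  omega

-- order of base mod p exists and is at most p - 1 (p ≥ 2, coprime): Euler's theorem.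
lemma pv_ord_exists (p base : Int) (hp : 2 ≤ p) (hg : Int.gcd base p = 1) :
    ∃ m : Nat, 1 ≤ m ∧ (m : Int) ≤ p - 1 ∧ PySem.Int.mod (base ^ m) p = 1 := by
  have hn2 : 2 ≤ p.toNat := by omega
  have hco : Nat.Coprime base.natAbs p.toNat := by
    have h : p.natAbs = p.toNat := by omega
    unfold Int.gcd at hg
    rwa [h] at hg
  have hne : NeZero p.toNat := ⟨by omega⟩
  have hu : IsUnit ((base : ZMod p.toNat)) := by
    have h1 : IsUnit ((base.natAbs : ZMod p.toNat)) := (ZMod.isUnit_iff_coprime _ _).mpr hco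
    have habs : (((base.natAbs : Int)) : ZMod p.toNat) = ((base.natAbs : Nat) : ZMod p.toNat) :=
      Int.cast_natCast _
    rcases Int.natAbs_eq base with h | h
    · rw [h, habs]; exact h1
    · rw [h, Int.cast_neg, habs]; exact h1.neg
  refine ⟨p.toNat.totient, Nat.totient_pos.mpr (by omega), ?_, ?_⟩
  · have := Nat.totient_lt p.toNat (by omega); omega
  · have hpow : ((base : ZMod p.toNat)) ^ p.toNat.totient = 1 := by
      have h2 := congrArg (Units.val) (ZMod.pow_totient hu.unit)
      rw [Units.val_pow_eq_pow_val, IsUnit.unit_spec, Units.val_one] at h2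
      exact h2
    have hcast : (((base ^ p.toNat.totient : Int)) : ZMod p.toNat) = ((1 : Int) : ZMod p.toNat) := by
      push_cast [hpow]
      rfl
    have hmod : base ^ p.toNat.totient % ((p.toNat : Int)) = 1 % ((p.toNat : Int)) :=
      (ZMod.intCast_eq_intCast_iff _ _ _).mp hcast
    rw [PySem.Int.mod_eq_emod_of_pos (by omega)]
    rw [show ((p.toNat : Int)) = p from by omega] at hmod
    rw [hmod, Int.one_emod, if_neg (by omega)]

-- iterating v ↦ v·base mod p from base mod p yields base^(k+1) mod p.
lemma pv_iter_pow (p base : Int) (k : Nat) :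
    (fun v => PySem.Int.mod (v * base) p)^[k] (PySem.Int.mod base p)
    = PySem.Int.mod (base ^ (k + 1)) p := by
  induction k with
  | zero => simp
  | succ n ih =>
    rw [Function.iterate_succ_apply', ih]
    rw [pv_mod_mul_mod]
    congr 1
    ring

-- one-step unfoldings of the two while-loops (definitional)
lemma pvMoLoop_succ (a p : Int) (f : Nat) (v o : Int) :
    pvMoLoop a p (f + 1) v o = if v = 1 then some o
      else if o + 1 > p then none else pvMoLoop a p f (PySem.Int.mod (v * a) p) (o + 1) := rfl
lemma pvOrderLoop_succ (base p : Int) (f : Nat) (v m : Int) :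
    pvOrderLoop base p (f + 1) v m = if v = 1 then m
      else pvOrderLoop base p f (PySem.Int.mod (v * base) p) (m + 1) := rfl

-- both while-loops, run with the same fuel from the same state, stop at the same count
-- (provided the iteration reaches 1 within the fuel and A's cap order > p never fires).
lemma pv_loops_agree (p base : Int) (k : Nat) : ∀ (f : Nat) (v m : Int),
    (fun v => PySem.Int.mod (v * base) p)^[k] v = 1 → k < f → m + k ≤ p →
    ∃ j : Nat, j ≤ k ∧ pvMoLoop base p f v m = some (m + j) ∧ pvOrderLoop base p f v m = m + j := by
  induction k with
  | zero =>
    intro f v m h1 _ _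
    simp only [Function.iterate_zero_apply] at h1
    obtain ⟨f', rfl⟩ : ∃ f', f = f' + 1 := ⟨f - 1, by omega⟩
    exact ⟨0, le_refl 0, by rw [pvMoLoop_succ, if_pos h1]; simp,
      by rw [pvOrderLoop_succ, if_pos h1]; simp⟩
  | succ n ih =>
    intro f v m h1 hf hcap
    obtain ⟨f', rfl⟩ : ∃ f', f = f' + 1 := ⟨f - 1, by omega⟩
    by_cases hv : v = 1
    · exact ⟨0, by omega, by rw [pvMoLoop_succ, if_pos hv]; simp,
        by rw [pvOrderLoop_succ, if_pos hv]; simp⟩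
    · rw [Function.iterate_succ_apply] at h1
      obtain ⟨j, hj, hA, hB⟩ :=
        ih f' (PySem.Int.mod (v * base) p) (m + 1) h1 (by omega) (by omega)
      refine ⟨j + 1, by omega, ?_, ?_⟩
      · rw [pvMoLoop_succ, if_neg hv, if_neg (by push_cast at hcap ⊢; omega), hA]
        congr 1
        push_cast
        ring
      · rw [pvOrderLoop_succ, if_neg hv, hB]
        push_cast
        ring

-- the two step counts agree whenever not (p = 0 with |base| = 1).
lemma pv_steps_eq (p base : Int) (hx : ¬ (p = 0 ∧ base.natAbs = 1)) :
    (match multiplicative_order base p with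
     | some o => if o = 0 then p else o
     | none => p) = pvOrderOrP base p := by
  by_cases hg : Int.gcd base p = 1
  · by_cases hp : 2 ≤ p
    · -- interesting case: the order exists; both loops find it
      obtain ⟨m, hm1, hmle, hmod⟩ := pv_ord_exists p base hp hg
      have hiter : (fun v => PySem.Int.mod (v * base) p)^[m - 1] (PySem.Int.mod base p) = 1 := by
        rw [pv_iter_pow]
        rw [show m - 1 + 1 = m from by omega]
        exact hmod
      obtain ⟨j, hj, hA, hB⟩ := pv_loops_agree p base (m - 1) (p.toNat + 1)
        (PySem.Int.mod base p) 1 hiter (by omega) (by omega)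
      rw [multiplicative_order, if_neg (by simp [hg]), hA,
        pvOrderOrP, if_neg (by omega), hB]
      show (if (1 + (j : Int)) = 0 then p else 1 + (j : Int)) = 1 + (j : Int)
      rw [if_neg (by omega)]
    · -- p ≤ 1, coprime
      rcases lt_trichotomy p 0 with hneg | h0 | hpos
      · -- p < 0: A's loop hits its order > p cap at once; both sides give p
        have hvne : PySem.Int.mod base p ≠ 1 := by
          have := PySem.Int.mod_neg_bounds (a := base) hneg
          omega
        rw [multiplicative_order, if_neg (by simp [hg]),
          show p.toNat + 1 = 0 + 1 from by omega,
          pvMoLoop_succ, if_neg hvne, if_pos (by omega),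
          pvOrderOrP, if_pos (Or.inl (by omega))]
      · exact absurd ⟨h0, by simpa [h0] using hg⟩ hx
      · -- p = 1: base % 1 = 0, and the cap order > 1 fires on the first iteration
        have hp1 : p = 1 := by omega
        subst hp1
        have hv0 : PySem.Int.mod base 1 = 0 := by
          simp [PySem.Int.mod, Int.fmod_one]
        rw [multiplicative_order, if_neg (by simp [hg]),
          show (1 : Int).toNat + 1 = 1 + 1 from by omega,
          pvMoLoop_succ, if_neg (by rw [hv0]; norm_num), if_pos (by omega),
          pvOrderOrP, if_pos (Or.inl (by omega))]
  · -- non-coprime: None / the `p ≤ 1 ∨ gcd ≠ 1` branch — both give p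
    rw [multiplicative_order, if_pos (by simp [hg]),
      pvOrderOrP, if_pos (Or.inr hg)]

-- ===== VERDICT (by name: the statement is the Claim_ definition above) =====
theorem long_division_remainders_spec : Claim_equal_long_division_remainders := by
  intro p base steps _hdom hpre
  unfold Spec_long_division_remainders
  unfold long_division_remainders long_division_remainders_alt
  cases steps with
  | some s =>
    simp only [Option.getD_some]
    exact pv_lists_eq p base s
  | none =>
    have hx : ¬ (p = 0 ∧ base.natAbs = 1) := by
      unfold Pre_long_division_remainders at hpre
      rcases hpre with h | ⟨_, h⟩ | ⟨h, _⟩ <;> simp_all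
    simp only [Option.getD_none]
    rw [pv_steps_eq p base hx]
    exact pv_lists_eq p base (pvOrderOrP base p)

@[simp]
theorem long_division_remainders_raises : Claim_raises_long_division_remainders := by
  unfold Claim_raises_long_division_remainders
  constructor
  · intro p base steps _ hr
    unfold Raises_long_division_remainders at hr
    unfold Pre_long_division_remainders
    obtain ⟨h0, h1, hn⟩ := hr
    subst h0 hn
    simp [h1]
  · exact ⟨by decide, by decide, by decide⟩
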